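-- pv_equiv track=rewrite | github.com/zhmzm/stability-steering | src/eval/eval_MATH_vllm.py | trim_output
-- ===== SOURCE A (Python) =====
-- def trim_output(output: str) -> str:
--     instruction_prefix = "Answer the following question"
--     question_prefix = "Question:"
--     comment_prefix = "Comment:"
--     for prefix in [instruction_prefix, question_prefix, comment_prefix]:
--         if prefix in output:
--             output = output.split(prefix)[0]
--     return output
-- ===== SOURCE B (Python) =====
-- def trim_output(output: str) -> str:
--     # Cut once at the earliest occurrence of any marker (the three markers
--     # never overlap each other, so this equals A's sequential re-truncation).
--     n = len(output)
--     c1 = output.find("Answer the following question")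
--     c2 = output.find("Question:")
--     c3 = output.find("Comment:")
--     cut = min(c1 if c1 != -1 else n,
--               c2 if c2 != -1 else n,
--               c3 if c3 != -1 else n)
--     return output[:cut]
-- ===== Notes on version B (the rewrite author's own statement) =====
-- stated objective: simpler
-- what changed: Instead of A's loop that repeatedly re-truncates the string by splitting on each marker in turn, B computes the three find() positions on the original string once, takes their minimum (len(output) when a marker is absent) and returns a single slice; this is equivalent because no marker's occurrence can straddle another marker's occurrence.
import Mathlib
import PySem

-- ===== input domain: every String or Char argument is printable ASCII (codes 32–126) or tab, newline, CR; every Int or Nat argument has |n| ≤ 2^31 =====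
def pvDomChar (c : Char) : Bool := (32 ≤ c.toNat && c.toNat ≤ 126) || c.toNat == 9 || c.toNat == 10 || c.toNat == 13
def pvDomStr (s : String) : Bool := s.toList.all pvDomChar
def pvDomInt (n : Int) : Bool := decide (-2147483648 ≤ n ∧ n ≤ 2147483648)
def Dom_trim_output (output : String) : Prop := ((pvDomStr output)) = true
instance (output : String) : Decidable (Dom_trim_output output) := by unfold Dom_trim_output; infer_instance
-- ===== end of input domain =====

-- B cuts once at the earliest occurrence of any of the three markers instead of A's
-- sequential split-and-reassign loop; equal because no marker occurrence can straddle
-- another marker's occurrence (objective: simpler).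


-- ===== PORT A =====
def trim_output (output : String) : String :=
  let instruction_prefix := "Answer the following question"
  let question_prefix := "Question:"
  let comment_prefix := "Comment:"
  [instruction_prefix, question_prefix, comment_prefix].foldl
    (fun output prefix_ =>
      if PySem.Str.isIn prefix_ output then
        -- output.split(prefix)[0]; split with a nonempty separator always returns a
        -- nonempty list, so the defaults of getD/headD are unreachable
        ((PySem.Str.split? output prefix_).getD []).headD output
      else output) output

-- ===== PORT B =====
def trim_output_alt (output : String) : String :=
  let n : Int := PySem.Str.len output
  let c1 := PySem.Str.find output "Answer the following question"
  let c2 := PySem.Str.find output "Question:"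
  let c3 := PySem.Str.find output "Comment:"
  let cut := min (min (if c1 ≠ -1 then c1 else n) (if c2 ≠ -1 then c2 else n))
                 (if c3 ≠ -1 then c3 else n)
  PySem.Str.slice output none (some cut)

-- ===== PRECONDITION & SPEC =====
def Spec_trim_output (output : String) (out : String) : Prop := out = trim_output_alt output
instance (output : String) (out : String) : Decidable (Spec_trim_output output out) := by unfold Spec_trim_output; infer_instance

-- ===== CLAIM (what is proved, stated in full; the proofs are below) =====
def Claim_equal_trim_output : Prop := ∀ (output : String), Dom_trim_output output → Spec_trim_output output (trim_output output)

-- ===== LEMMAS AND PROOFS =====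

-- the cut position of A's `'p in s' / s.split(p)[0]` step: first occurrence, else length
def cutAt (s p : List Char) : Nat :=
  if PySem.Chars.find s p = -1 then s.length else (PySem.Chars.find s p).toNat

lemma prefix_drop_infix {s p : List Char} {i : Nat} (h : p <+: s.drop i) : p <:+: s :=
  h.isInfix.trans (List.drop_suffix i s).isInfix

lemma find_eq_of {s p : List Char} {j : Nat} (hm : p <+: s.drop j)
    (hmin : ∀ i, i < j → ¬ p <+: s.drop i) : PySem.Chars.find s p = j := by
  have hinf : p <:+: s := prefix_drop_infix hm
  have hnn : 0 ≤ PySem.Chars.find s p := (PySem.Chars.find_nonneg_iff s p).mpr hinf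
  obtain ⟨h1, h2⟩ := PySem.Chars.find_spec hnn
  have : (PySem.Chars.find s p).toNat = j := by
    rcases Nat.lt_trichotomy (PySem.Chars.find s p).toNat j with h | h | h
    · exact absurd h1 (hmin _ h)
    · exact h
    · exact absurd hm (h2 _ h)
  omega

lemma cutAt_le (s p : List Char) : cutAt s p ≤ s.length := by
  unfold cutAt
  have := PySem.Chars.find_le_length s p
  split_ifs <;> omega

lemma find_found {s p : List Char} (h : PySem.Chars.find s p ≠ -1) :
    p <+: s.drop (cutAt s p) ∧ ∀ i, i < cutAt s p → ¬ p <+: s.drop i := by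
  have hinf : p <:+: s := (PySem.Chars.find_ne_neg_one_iff s p).mp h
  have hnn : 0 ≤ PySem.Chars.find s p := (PySem.Chars.find_nonneg_iff s p).mpr hinf
  obtain ⟨h1, h2⟩ := PySem.Chars.find_spec hnn
  unfold cutAt
  rw [if_neg h]
  exact ⟨h1, h2⟩

lemma find_none {s p : List Char} (h : PySem.Chars.find s p = -1) (i : Nat) :
    ¬ p <+: s.drop i := fun hp =>
  ((PySem.Chars.find_eq_neg_one_iff s p).mp h) (prefix_drop_infix hp)

lemma cutAt_cons {c : Char} {rest sep : List Char}
    (hnp : ¬ sep <+: (c :: rest)) : cutAt (c :: rest) sep = cutAt rest sep + 1 := by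
  by_cases hf : PySem.Chars.find rest sep = -1
  · have hnone : PySem.Chars.find (c :: rest) sep = -1 := by
      rw [PySem.Chars.find_eq_neg_one_iff]
      intro hinf
      obtain ⟨j, hj⟩ := (PySem.Chars.exists_prefix_drop_iff_isIn sep (c :: rest)).mpr
        ((PySem.Chars.isIn_iff_infix sep (c :: rest)).mpr hinf)
      cases j with
      | zero => exact hnp (by simpa using hj)
      | succ k => exact find_none hf k (by simpa using hj)
    unfold cutAt
    rw [if_pos hnone, if_pos hf]
    simp
  · obtain ⟨hm, hmin⟩ := find_found hf
    have hcut : cutAt rest sep = (PySem.Chars.find rest sep).toNat := by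
      unfold cutAt; rw [if_neg hf]
    have hfind : PySem.Chars.find (c :: rest) sep = ((cutAt rest sep + 1 : Nat) : Int) := by
      apply find_eq_of
      · simpa using hm
      · intro i hi
        cases i with
        | zero => simpa using hnp
        | succ k =>
          intro hk
          exact hmin k (by omega) (by simpa using hk)
    unfold cutAt
    rw [if_neg (by rw [hfind]; omega), if_neg hf, hfind]
    rw [hcut]
    omega

lemma getLast?_cons_eq {α : Type} (a : α) (acc : List α) :
    (a :: acc).getLast? = some (acc.getLast?.getD a) := by
  induction acc generalizing a with
  | nil => simp
  | cons b l ih => rw [List.getLast?_cons_cons, ih b]; simp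

-- go with a nonempty accumulator: the head of the final result is fixed already
lemma go_head_acc (sep : List Char) (fuel : Nat) :
    ∀ (l cur a : List Char) (acc : List (List Char)),
    (PySem.Chars.splitOn.go sep fuel l cur (a :: acc)).head? = (a :: acc).getLast? := by
  induction fuel with
  | zero =>
    intro l cur a acc
    simp [PySem.Chars.splitOn.go, List.head?_reverse, getLast?_cons_eq]
  | succ n ih =>
    intro l cur a acc
    cases l with
    | nil => simp [PySem.Chars.splitOn.go, List.head?_reverse, getLast?_cons_eq]
    | cons c rest =>
      by_cases hpre : sep.isPrefixOf (c :: rest) = true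
      · simp only [PySem.Chars.splitOn.go, hpre, if_true]
        rw [ih]
        simp [List.getLast?_cons_cons]
      · simp only [PySem.Chars.splitOn.go, hpre, Bool.false_eq_true, if_false]
        exact ih rest (c :: cur) a acc

lemma go_head (sep : List Char) (fuel : Nat) :
    ∀ (l cur : List Char), l.length < fuel →
    (PySem.Chars.splitOn.go sep fuel l cur []).head? =
      some (cur.reverse ++ l.take (cutAt l sep)) := by
  induction fuel with
  | zero => intro l cur h; omega
  | succ n ih =>
    intro l cur h
    cases l with
    | nil => simp [PySem.Chars.splitOn.go]
    | cons c rest =>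
      by_cases hpre : sep.isPrefixOf (c :: rest) = true
      · simp only [PySem.Chars.splitOn.go, hpre, if_true]
        rw [go_head_acc]
        have hfind : PySem.Chars.find (c :: rest) sep = ((0 : Nat) : Int) := by
          apply find_eq_of
          · simpa using List.isPrefixOf_iff_prefix.mp hpre
          · intro i hi; omega
        have : cutAt (c :: rest) sep = 0 := by
          unfold cutAt
          rw [if_neg (by rw [hfind]; omega), hfind]
          simp
        simp [this]
      · simp only [PySem.Chars.splitOn.go, hpre, Bool.false_eq_true, if_false]
        rw [ih rest (c :: cur) (by simp at h ⊢; omega)]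
        rw [cutAt_cons (fun hq => hpre (List.isPrefixOf_iff_prefix.mpr hq))]
        simp

lemma splitOn_head (s sep : List Char) :
    (PySem.Chars.splitOn s sep).head? = some (s.take (cutAt s sep)) := by
  have := go_head sep (s.length + 1) s [] (by omega)
  simpa [PySem.Chars.splitOn] using this

-- A's loop body, at the string level, is a take at cutAt
lemma cutS_toList (o p : String) (hp : p.toList ≠ []) :
    ((if PySem.Str.isIn p o then ((PySem.Str.split? o p).getD []).headD o
      else o) : String).toList = o.toList.take (cutAt o.toList p.toList) := by
  split_ifs with hin
  · have hsplit : PySem.Str.split? o p =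
        some ((PySem.Chars.splitOn o.toList p.toList).map String.ofList) := by
      simp [PySem.Str.split?, PySem.Chars.split?, List.isEmpty_iff, hp]
    rw [hsplit]
    simp only [Option.getD_some]
    obtain ⟨t, ht⟩ : ∃ t, PySem.Chars.splitOn o.toList p.toList =
        (o.toList.take (cutAt o.toList p.toList)) :: t := by
      have hh := splitOn_head o.toList p.toList
      cases hL : PySem.Chars.splitOn o.toList p.toList with
      | nil => rw [hL] at hh; simp at hh
      | cons x xs =>
        rw [hL] at hh
        simp only [List.head?_cons, Option.some.injEq] at hh
        exact ⟨xs, by rw [hh]⟩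
    rw [ht]
    simp
  · have hI : PySem.Chars.isIn p.toList o.toList = false := by
      rw [← PySem.Str.isIn_eq]
      exact Bool.eq_false_iff.mpr hin
    have hf : PySem.Chars.find o.toList p.toList = -1 :=
      (PySem.Chars.find_eq_neg_one_iff _ _).mpr
        (fun hinf => by rw [(PySem.Chars.isIn_iff_infix _ _).mpr hinf] at hI; exact absurd hI (by simp))
    have : cutAt o.toList p.toList = o.toList.length := by unfold cutAt; rw [if_pos hf]
    rw [this, List.take_length]

-- straddle-freedom: no occurrence of pL can overlap the start of an occurrence of pE
def NoStraddle (pL pE : List Char) : Prop :=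
  ∀ k, k < pL.length → 0 < k → ¬ pE <+: pL.drop k ∧ ¬ pL.drop k <+: pE

lemma prefix_of_prefix_of_le {l1 l2 l3 : List Char} (h1 : l1 <+: l3) (h2 : l2 <+: l3)
    (hl : l1.length ≤ l2.length) : l1 <+: l2 := by
  have e1 : l1 = l3.take l1.length := List.prefix_iff_eq_take.mp h1
  have e2 : l2 = l3.take l2.length := List.prefix_iff_eq_take.mp h2
  have : l2.take l1.length = l1 := by
    conv_lhs => rw [e2]
    rw [List.take_take, Nat.min_eq_left hl]
    exact e1.symm
  exact this ▸ List.take_prefix l1.length l2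

lemma no_overlap {s pE pL : List Char} (hn : NoStraddle pL pE) {j jE : Nat}
    (hjE : pE <+: s.drop jE) (hjL : pL <+: s.drop j)
    (h1 : j < jE) (h2 : jE < j + pL.length) : False := by
  obtain ⟨r, hr⟩ := hjL
  have hk1 : jE - j < pL.length := by omega
  have hk0 : 0 < jE - j := by omega
  have hdropE : s.drop jE = pL.drop (jE - j) ++ r := by
    have hstep : s.drop jE = (s.drop j).drop (jE - j) := by
      rw [List.drop_drop]
      congr 1
      omega
    rw [hstep, ← hr, List.drop_append_of_le_length (by omega)]
  have hL' : pL.drop (jE - j) <+: s.drop jE := ⟨r, hdropE.symm⟩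
  obtain ⟨hA, hB⟩ := hn (jE - j) hk1 hk0
  rcases le_total pE.length (pL.drop (jE - j)).length with h | h
  · exact hA (prefix_of_prefix_of_le hjE hL' h)
  · exact hB (prefix_of_prefix_of_le hL' hjE h)

lemma straddle_free {s pE pL : List Char} (hn : NoStraddle pL pE) :
    ∀ j, j < cutAt s pE → cutAt s pE < j + pL.length → ¬ pL <+: s.drop j := by
  intro j hja hjb hpre
  by_cases hf : PySem.Chars.find s pE = -1
  · have hb : cutAt s pE = s.length := by unfold cutAt; rw [if_pos hf]
    have := hpre.length_le
    simp only [List.length_drop] at this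
    omega
  · obtain ⟨hE, _⟩ := find_found hf
    exact no_overlap hn hE hpre hja hjb

lemma cut_take {s p : List Char} (hp : p ≠ []) {b : Nat} (hb : b ≤ s.length)
    (hstr : ∀ j, j < b → b < j + p.length → ¬ p <+: s.drop j) :
    cutAt (s.take b) p = min b (cutAt s p) := by
  have hp1 : 0 < p.length := by cases p with | nil => exact absurd rfl hp | cons _ _ => simp
  by_cases hf : PySem.Chars.find s p = -1
  · -- no occurrence in s at all: none in s.take b either
    have hnone : PySem.Chars.find (s.take b) p = -1 := by
      rw [PySem.Chars.find_eq_neg_one_iff]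
      intro hinf
      obtain ⟨i, hi⟩ := (PySem.Chars.exists_prefix_drop_iff_isIn p (s.take b)).mpr
        ((PySem.Chars.isIn_iff_infix p (s.take b)).mpr hinf)
      rw [List.drop_take] at hi
      exact find_none hf i (List.prefix_take_iff.mp hi).1
    have h1 : cutAt (s.take b) p = (s.take b).length := by unfold cutAt; rw [if_pos hnone]
    have h2 : cutAt s p = s.length := by unfold cutAt; rw [if_pos hf]
    rw [h1, h2, List.length_take]
  · obtain ⟨hm, hmin⟩ := find_found hf
    have hj0 := cutAt_le s p
    by_cases hcase : cutAt s p + p.length ≤ b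
    · -- the first occurrence fits inside the prefix s.take b
      have hfind : PySem.Chars.find (s.take b) p = ((cutAt s p : Nat) : Int) := by
        apply find_eq_of
        · rw [List.drop_take, List.prefix_take_iff]
          exact ⟨hm, by omega⟩
        · intro i hi hpre
          rw [List.drop_take, List.prefix_take_iff] at hpre
          exact hmin i hi hpre.1
      have h1 : cutAt (s.take b) p = cutAt s p := by
        have e : cutAt (s.take b) p = (PySem.Chars.find (s.take b) p).toNat := by
          unfold cutAt; rw [if_neg (by rw [hfind]; omega)]
        rw [e, hfind, Int.toNat_natCast]
      rw [h1]
      omega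
    · -- the first occurrence starts at or beyond b (it cannot straddle b)
      have hbj : b ≤ cutAt s p := by
        rcases Nat.lt_or_ge (cutAt s p) b with hlt | hge
        · exact absurd hm (hstr (cutAt s p) hlt (by omega))
        · exact hge
      have hnone : PySem.Chars.find (s.take b) p = -1 := by
        rw [PySem.Chars.find_eq_neg_one_iff]
        intro hinf
        obtain ⟨i, hi⟩ := (PySem.Chars.exists_prefix_drop_iff_isIn p (s.take b)).mpr
          ((PySem.Chars.isIn_iff_infix p (s.take b)).mpr hinf)
        rw [List.drop_take, List.prefix_take_iff] at hi
        exact hmin i (by omega) hi.1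
      have h1 : cutAt (s.take b) p = (s.take b).length := by unfold cutAt; rw [if_pos hnone]
      rw [h1, List.length_take]
      omega

-- A's three sequential cuts equal one cut at the minimum position
lemma chain_eq (s p1 p2 p3 : List Char) (h2 : p2 ≠ []) (h3 : p3 ≠ [])
    (n21 : NoStraddle p2 p1) (n31 : NoStraddle p3 p1) (n32 : NoStraddle p3 p2) :
    ((s.take (cutAt s p1)).take (cutAt (s.take (cutAt s p1)) p2)).take
      (cutAt ((s.take (cutAt s p1)).take (cutAt (s.take (cutAt s p1)) p2)) p3)
    = s.take (min (min (cutAt s p1) (cutAt s p2)) (cutAt s p3)) := by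
  have c2 : cutAt (s.take (cutAt s p1)) p2 = min (cutAt s p1) (cutAt s p2) :=
    cut_take h2 (cutAt_le s p1) (straddle_free n21)
  have t2 : (s.take (cutAt s p1)).take (cutAt (s.take (cutAt s p1)) p2)
      = s.take (min (cutAt s p1) (cutAt s p2)) := by
    rw [c2, List.take_take]
    congr 1
    omega
  rw [t2]
  have hstr3 : ∀ j, j < min (cutAt s p1) (cutAt s p2) →
      min (cutAt s p1) (cutAt s p2) < j + p3.length → ¬ p3 <+: s.drop j := by
    intro j hj hjl
    rcases le_total (cutAt s p1) (cutAt s p2) with h | h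
    · rw [min_eq_left h] at hj hjl
      exact straddle_free n31 j hj hjl
    · rw [min_eq_right h] at hj hjl
      exact straddle_free n32 j hj hjl
  have c3 : cutAt (s.take (min (cutAt s p1) (cutAt s p2))) p3
      = min (min (cutAt s p1) (cutAt s p2)) (cutAt s p3) :=
    cut_take h3 (by have := cutAt_le s p1; omega) hstr3
  rw [c3, List.take_take]
  congr 1
  omega

-- B's "find, else len" expression is the cast of cutAt
lemma ifFind_eq_cutAt (o p : String) :
    (if PySem.Str.find o p ≠ -1 then PySem.Str.find o p else PySem.Str.len o)
      = ((cutAt o.toList p.toList : Nat) : Int) := by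
  rw [PySem.Str.find_eq, PySem.Str.len_eq]
  have hge := PySem.Chars.neg_one_le_find o.toList p.toList
  unfold cutAt
  by_cases h : PySem.Chars.find o.toList p.toList = -1
  · simp [h]
  · simp only [h, if_false, ne_eq, not_false_eq_true, if_true]
    omega

theorem trim_output_spec : Claim_equal_trim_output := by
  intro output _
  unfold Spec_trim_output
  rw [← String.toList_inj]
  have hA : (trim_output output).toList =
      ((output.toList.take (cutAt output.toList ("Answer the following question" : String).toList)).take
          (cutAt (output.toList.take (cutAt output.toList ("Answer the following question" : String).toList)) ("Question:" : String).toList)).take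
        (cutAt ((output.toList.take (cutAt output.toList ("Answer the following question" : String).toList)).take
          (cutAt (output.toList.take (cutAt output.toList ("Answer the following question" : String).toList)) ("Question:" : String).toList)) ("Comment:" : String).toList) := by
    simp only [trim_output, List.foldl_cons, List.foldl_nil]
    rw [cutS_toList _ "Comment:" (by decide), cutS_toList _ "Question:" (by decide),
        cutS_toList _ "Answer the following question" (by decide)]
  have hB : (trim_output_alt output).toList =
      output.toList.take (min (min (cutAt output.toList ("Answer the following question" : String).toList)
        (cutAt output.toList ("Question:" : String).toList)) (cutAt output.toList ("Comment:" : String).toList)) := by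
    simp only [trim_output_alt]
    rw [ifFind_eq_cutAt, ifFind_eq_cutAt, ifFind_eq_cutAt, ← Nat.cast_min, ← Nat.cast_min]
    rw [PySem.Str.toList_slice, PySem.Chars.slice_eq_listSlice,
        PySem.List.slice_to _ (by positivity)]
    rw [Int.toNat_natCast]
  rw [hA, hB]
  exact chain_eq output.toList _ _ _ (by decide) (by decide)
    (by unfold NoStraddle; decide) (by unfold NoStraddle; decide) (by unfold NoStraddle; decide)
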